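-- pv_equiv track=rewrite | github.com/ASSERT-KTH/Mokav | experiments/pynguin/c4b/single-return/generated_tests/src_540/8/src_540.py | func
-- ===== SOURCE A (Python) =====
-- def func(*args):
--
-- 	s = args[0]
-- 	index = [(- 1)]
-- 	for i in range(len(s)):
-- 	    if (s[i] in 'AEIOUY'):
-- 	        index.append(i)
-- 	index.append(len(s))
-- 	g = (- 2)
-- 	for i in range(1, len(index)):
-- 	    if ((index[i] - index[(i - 1)]) > g):
-- 	        g = (index[i] - index[(i - 1)])
-- 	return(g)
-- ===== SOURCE B (Python) =====
-- def func(*args):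
--     s = args[0]
--     prev, g = -1, -2
--     for i, c in enumerate(s):
--         if c in 'AEIOUY':
--             if i - prev > g:
--                 g = i - prev
--             prev = i
--     return max(g, len(s) - prev)
-- ===== Notes on version B (the rewrite author's own statement) =====
-- stated objective: simpler
-- what changed: B drops A's intermediate vowel-index list and its second pairwise-gap pass, fusing everything into a single enumerate pass that keeps only the last vowel position and the running max gap, closing with max(g, len(s)-prev).
import Mathlib
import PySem

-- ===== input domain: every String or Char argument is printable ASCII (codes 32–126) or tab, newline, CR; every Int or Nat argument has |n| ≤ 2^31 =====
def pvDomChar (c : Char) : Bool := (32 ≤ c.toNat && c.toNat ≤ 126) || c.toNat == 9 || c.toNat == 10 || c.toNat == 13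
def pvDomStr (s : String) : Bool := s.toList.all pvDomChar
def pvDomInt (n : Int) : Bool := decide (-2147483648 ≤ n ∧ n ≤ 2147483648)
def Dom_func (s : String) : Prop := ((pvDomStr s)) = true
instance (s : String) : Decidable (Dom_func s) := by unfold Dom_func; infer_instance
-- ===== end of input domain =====

-- B fuses A's two passes (vowel-index list, then pairwise max-gap scan) into one
-- single-state pass (prev position + running max); objective: simpler, same return value.


-- shared helper: Python's  c in 'AEIOUY'  for a single character c
def pvVowel (c : Char) : Bool := c ∈ ['A', 'E', 'I', 'O', 'U', 'Y']

-- ===== PORT A =====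
def func (s : String) : Int :=
  let cs := s.toList
  let index := (PySem.List.pyRange 0 (cs.length : Int) 1).foldl
    (fun idx i => if pvVowel (PySem.List.pyGetD cs i ' ') then idx ++ [i] else idx)
    [(-1 : Int)]
  let index := index ++ [(cs.length : Int)]
  (PySem.List.pyRange 1 (index.length : Int) 1).foldl
    (fun g i =>
      if PySem.List.pyGetD index i 0 - PySem.List.pyGetD index (i - 1) 0 > g then
        PySem.List.pyGetD index i 0 - PySem.List.pyGetD index (i - 1) 0
      else g)
    (-2)

-- ===== PORT B =====
def func_alt (s : String) : Int :=
  let cs := s.toList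
  let st := (PySem.List.enumerate cs 0).foldl
    (fun (st : Int × Int) ic =>
      if pvVowel ic.2 then
        (ic.1, if ic.1 - st.1 > st.2 then ic.1 - st.1 else st.2)
      else st)
    ((-1 : Int), (-2 : Int))
  max st.2 ((cs.length : Int) - st.1)

-- ===== PRECONDITION & SPEC =====
def Spec_func (s : String) (out : Int) : Prop := out = func_alt s
instance (s : String) (out : Int) : Decidable (Spec_func s out) := by unfold Spec_func; infer_instance

-- ===== CLAIM (what is proved, stated in full; the proofs are below) =====
def Claim_equal_func : Prop := ∀ (s : String), Dom_func s → Spec_func s (func s)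

-- ===== LEMMAS AND PROOFS =====

-- positions (starting at a) of the vowels of a char list
def pvVind : List Char → Int → List Int
  | [], _ => []
  | c :: t, a => if pvVowel c then a :: pvVind t (a + 1) else pvVind t (a + 1)

-- structural form of A's second loop: max pairwise gap over prev :: rest
def pvPairFold : Int → List Int → Int → Int
  | _, [], g => g
  | prev, x :: t, g => pvPairFold x t (if x - prev > g then x - prev else g)

-- structural form of B's loop: state (prev, g) over chars with positions from a
def pvBfold : List Char → Int → Int → Int → Int × Int
  | [], _, prev, g => (prev, g)
  | c :: t, a, prev, g =>
    if pvVowel c then pvBfold t (a + 1) a (if a - prev > g then a - prev else g)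
    else pvBfold t (a + 1) prev g

theorem pvLoop1 (t : List Char) : ∀ (a : Int) (acc : List Int) (G : Int → Char),
    (∀ k : Nat, k < t.length → G (a + k) = t.getD k ' ') →
    (PySem.List.pyRange a (a + t.length) 1).foldl
      (fun idx i => if pvVowel (G i) then idx ++ [i] else idx) acc
      = acc ++ pvVind t a := by
  induction t with
  | nil => intro a acc G _; simp [pvVind, PySem.List.pyRange_one_eq_nil]
  | cons c t ih =>
    intro a acc G hG
    rw [PySem.List.pyRange_one_cons (by simp)]
    have h0 := hG 0 (by simp)
    simp only [List.getD_cons_zero, Nat.cast_zero, add_zero] at h0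
    have hrest : (PySem.List.pyRange (a + 1) (a + ((c :: t).length : Nat)) 1) =
        PySem.List.pyRange (a + 1) (a + 1 + (t.length : Nat)) 1 := by
      congr 1; push_cast [List.length_cons]; try ring
    simp only [List.foldl_cons, h0, hrest]
    rw [ih (a + 1) _ G (fun k hk => by
      have := hG (k + 1) (by simp; omega)
      simpa [add_assoc, add_comm, add_left_comm] using this)]
    by_cases hv : pvVowel c
    · simp [hv, pvVind, List.append_assoc]
    · simp [hv, pvVind]

theorem pvLoop2 (t : List Int) : ∀ (a prev g : Int) (G : Int → Int),
    (∀ k : Nat, k < t.length → G (a + 1 + k) = t.getD k 0) → G a = prev →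
    (PySem.List.pyRange (a + 1) (a + 1 + t.length) 1).foldl
      (fun g i => if G i - G (i - 1) > g then G i - G (i - 1) else g) g
      = pvPairFold prev t g := by
  induction t with
  | nil => intro a prev g G _ _; simp [pvPairFold, PySem.List.pyRange_one_eq_nil]
  | cons x t ih =>
    intro a prev g G hG ha
    rw [PySem.List.pyRange_one_cons (by simp)]
    have h0 := hG 0 (by simp)
    simp only [List.getD_cons_zero, Nat.cast_zero, add_zero] at h0
    have hrest : (PySem.List.pyRange (a + 1 + 1) (a + 1 + ((x :: t).length : Nat)) 1) =
        PySem.List.pyRange (a + 1 + 1) (a + 1 + 1 + (t.length : Nat)) 1 := by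
      congr 1; push_cast [List.length_cons]; try ring
    simp only [List.foldl_cons, add_sub_cancel_right, h0, ha, hrest]
    rw [ih (a + 1) x _ G (fun k hk => by
      have := hG (k + 1) (by simp; omega)
      simpa [add_assoc, add_comm, add_left_comm] using this) h0]
    rfl

theorem pvLoop3 (t : List Char) : ∀ (a prev g : Int),
    (PySem.List.enumerate t a).foldl
      (fun (st : Int × Int) ic =>
        if pvVowel ic.2 then
          (ic.1, if ic.1 - st.1 > st.2 then ic.1 - st.1 else st.2)
        else st) (prev, g)
      = pvBfold t a prev g := by
  induction t with
  | nil => intro a prev g; simp [pvBfold, PySem.List.enumerate_nil]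
  | cons c t ih =>
    intro a prev g
    rw [PySem.List.enumerate_cons]
    by_cases hv : pvVowel c <;> simp [hv, pvBfold, ih]

theorem pvBridge (t : List Char) : ∀ (a prev g n : Int),
    pvPairFold prev (pvVind t a ++ [n]) g =
      (fun st : Int × Int => if n - st.1 > st.2 then n - st.1 else st.2)
        (pvBfold t a prev g) := by
  induction t with
  | nil => intro a prev g n; simp [pvVind, pvPairFold, pvBfold]
  | cons c t ih =>
    intro a prev g n
    by_cases hv : pvVowel c
    · simp only [pvVind, pvBfold, hv, if_true, List.cons_append, pvPairFold]
      exact ih (a + 1) a _ n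
    · simp only [pvVind, pvBfold, hv]
      exact ih (a + 1) prev g n

theorem pvMaxIf (g d : Int) : max g d = if d > g then d else g := by
  split_ifs with h <;> omega

-- ===== VERDICT (by name: the statement is the Claim_ definition above) =====
theorem func_spec : Claim_equal_func := by
  intro s _
  show func s = func_alt s
  unfold func func_alt
  set cs := s.toList with hcs
  simp only []
  have h1 := pvLoop1 cs 0 [(-1 : Int)] (fun i => PySem.List.pyGetD cs i ' ')
    (fun k hk => by simp)
  simp only [zero_add] at h1
  rw [h1]
  set L : List Int := ([(-1 : Int)] ++ pvVind cs 0) ++ [(cs.length : Int)] with hL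
  have hG : ∀ k : Nat, k < (pvVind cs 0 ++ [(cs.length : Int)]).length →
      (fun i => PySem.List.pyGetD L i 0) ((0 : Int) + 1 + (k : Nat)) =
        (pvVind cs 0 ++ [(cs.length : Int)]).getD k 0 := by
    intro k hk
    have hcast : (0 : Int) + 1 + (k : Nat) = ((k + 1 : Nat) : Int) := by push_cast; ring
    simp only [hcast, PySem.List.pyGetD_natCast, hL, List.singleton_append]
    simp
  have hA : (fun i => PySem.List.pyGetD L i 0) (0 : Int) = -1 := by
    simp [hL, PySem.List.pyGetD_zero]
  have h2 := pvLoop2 (pvVind cs 0 ++ [(cs.length : Int)]) 0 (-1) (-2)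
    (fun i => PySem.List.pyGetD L i 0) hG hA
  simp only [zero_add] at h2
  have hlen : (L.length : Int) = 1 + ((pvVind cs 0 ++ [(cs.length : Int)]).length : Int) := by
    rw [hL]; simp; ring
  rw [hlen, h2, pvBridge cs 0 (-1) (-2) (cs.length : Int), pvLoop3]
  simp only []
  exact (pvMaxIf _ _).symm
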